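-- pv_equiv track=rewrite | github.com/Shreekar11/insura-ai | apps/backend/app/services/extracted/services/synthesis/coverage_synthesizer.py | _split_coverage_references
-- ===== SOURCE A (Python) =====
-- from typing import Dict, List, Any, Optional
--
-- def _split_coverage_references(impacted_coverage: str) -> List[str]:
--     """Split multi-coverage references.
--
--     Args:
--         impacted_coverage: Possibly space-separated coverage list.
--
--     Returns:
--         List of individual coverage names.
--     """
--     # Common patterns like "AUTO DEALERS COVERAGE FORM BUSINESS AUTO COVERAGE FORM"
--     # These are space-separated form names
--     forms = []
--     current = []
--
--     for word in impacted_coverage.split():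
--         current.append(word)
--         if word.upper() == "FORM":
--             forms.append(" ".join(current))
--             current = []
--
--     if current:
--         # Remaining words form one coverage
--         if forms:
--             # Append to last form if it looks like a continuation
--             forms.append(" ".join(current))
--         else:
--             forms = [" ".join(current)]
--
--     return forms if forms else [impacted_coverage]
-- ===== SOURCE B (Python) =====
-- def _split_coverage_references(impacted_coverage: str):
--     """Split multi-coverage references by cutting after each FORM token."""
--     tokens = impacted_coverage.split()
--     if not tokens:
--         return [impacted_coverage]
--     segments = []
--     while tokens:
--         k = next((i for i, t in enumerate(tokens) if t.upper() == "FORM"), None)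
--         if k is None:
--             segments.append(" ".join(tokens))
--             break
--         segments.append(" ".join(tokens[:k + 1]))
--         tokens = tokens[k + 1:]
--     return segments
-- ===== Notes on version B (the rewrite author's own statement) =====
-- stated objective: alternative
-- what changed: Replaces A's single word-by-word fold with (forms, current) accumulators by a cut-point decomposition: repeatedly find the first token whose upper() is FORM, slice the token list there, join and emit the segment, and recurse on the remainder.
import Mathlib
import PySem

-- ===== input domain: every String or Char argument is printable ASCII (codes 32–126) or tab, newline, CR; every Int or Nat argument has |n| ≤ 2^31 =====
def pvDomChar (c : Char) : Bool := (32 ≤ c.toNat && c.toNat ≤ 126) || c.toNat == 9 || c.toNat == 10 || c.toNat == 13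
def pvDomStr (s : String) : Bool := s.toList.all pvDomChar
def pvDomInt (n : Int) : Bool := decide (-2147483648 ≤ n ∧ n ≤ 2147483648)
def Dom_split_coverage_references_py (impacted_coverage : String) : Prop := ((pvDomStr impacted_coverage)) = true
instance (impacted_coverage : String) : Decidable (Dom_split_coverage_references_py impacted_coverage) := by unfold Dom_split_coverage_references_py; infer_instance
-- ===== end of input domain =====

-- B replaces A's single fold with (forms, current) accumulators by a cut-at-first-FORM
-- slice-and-recurse decomposition (alternative decomposition, same cost).

-- ===== PORT A =====
def pvStepA (st : List String × List String) (word : String) : List String × List String :=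
  let current := st.2 ++ [word]
  if PySem.Str.upper word == "FORM" then (st.1 ++ [PySem.Str.join " " current], [])
  else (st.1, current)

def split_coverage_references_py (impacted_coverage : String) : List String :=
  let st := (PySem.Str.split₀ impacted_coverage).foldl pvStepA ([], [])
  let forms :=
    if st.2 ≠ [] then
      (if st.1 ≠ [] then st.1 ++ [PySem.Str.join " " st.2] else [PySem.Str.join " " st.2])
    else st.1
  if forms ≠ [] then forms else [impacted_coverage]

-- ===== PORT B =====
-- first index i with tokens[i].upper() == "FORM" (the next(... enumerate ...) search in Source B)
def pvFindForm : List String → Option Nat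
  | [] => none
  | w :: ws => if PySem.Str.upper w == "FORM" then some 0 else (pvFindForm ws).map (· + 1)

-- the while loop of Source B: emit " ".join(tokens[:k+1]) and continue on tokens[k+1:]
def pvSegB : List String → List String
  | [] => []
  | w :: ws =>
    match pvFindForm (w :: ws) with
    | none => [PySem.Str.join " " (w :: ws)]
    | some k => PySem.Str.join " " ((w :: ws).take (k + 1)) :: pvSegB ((w :: ws).drop (k + 1))
termination_by ts => ts.length
decreasing_by simp [List.length_drop]

def split_coverage_references_py_alt (impacted_coverage : String) : List String :=
  let tokens := PySem.Str.split₀ impacted_coverage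
  if tokens = [] then [impacted_coverage] else pvSegB tokens

-- ===== PRECONDITION & SPEC =====
def Spec_split_coverage_references_py (impacted_coverage : String) (out : List String) : Prop := out = split_coverage_references_py_alt impacted_coverage
instance (impacted_coverage : String) (out : List String) : Decidable (Spec_split_coverage_references_py impacted_coverage out) := by unfold Spec_split_coverage_references_py; infer_instance

-- ===== CLAIM (what is proved, stated in full; the proofs are below) =====
def Claim_equal_split_coverage_references_py : Prop := ∀ (impacted_coverage : String), Dom_split_coverage_references_py impacted_coverage → Spec_split_coverage_references_py impacted_coverage (split_coverage_references_py impacted_coverage)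

-- ===== LEMMAS AND PROOFS =====

-- Direct (non-accumulator) form of A's loop + its trailing-current flush.
def pvSegCur (cur : List String) : List String → List String
  | [] => if cur = [] then [] else [PySem.Str.join " " cur]
  | w :: ws =>
    if PySem.Str.upper w == "FORM" then PySem.Str.join " " (cur ++ [w]) :: pvSegCur [] ws
    else pvSegCur (cur ++ [w]) ws

theorem pvFoldA_eq (ts : List String) : ∀ (forms cur : List String),
    (let st := ts.foldl pvStepA (forms, cur)
     if st.2 = [] then st.1 else st.1 ++ [PySem.Str.join " " st.2])
      = forms ++ pvSegCur cur ts := by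
  induction ts with
  | nil =>
    intro forms cur
    simp only [List.foldl_nil, pvSegCur]
    split <;> simp_all
  | cons w ws ih =>
    intro forms cur
    simp only [List.foldl_cons, pvStepA, pvSegCur]
    by_cases h : PySem.Str.upper w == "FORM" <;> simp only [h, if_pos, if_false, Bool.false_eq_true] <;> rw [ih] <;> simp

theorem pvSegCur_eq (ts : List String) : ∀ (cur : List String),
    pvSegCur cur ts =
      match pvFindForm ts with
      | none => if cur ++ ts = [] then [] else [PySem.Str.join " " (cur ++ ts)]
      | some k => PySem.Str.join " " (cur ++ ts.take (k + 1)) :: pvSegCur [] (ts.drop (k + 1)) := by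
  induction ts with
  | nil => intro cur; simp [pvSegCur, pvFindForm]
  | cons w ws ih =>
    intro cur
    simp only [pvSegCur, pvFindForm]
    by_cases h : PySem.Str.upper w == "FORM"
    · simp [h]
    · simp only [h, Bool.false_eq_true, ite_false]
      rw [ih]
      cases hf : pvFindForm ws with
      | none => simp
      | some k => simp

theorem pvSegCur_nil_eq_segB (ts : List String) : pvSegCur [] ts = pvSegB ts := by
  induction hn : ts.length using Nat.strong_induction_on generalizing ts with
  | _ n ih =>
    cases ts with
    | nil => simp [pvSegCur, pvSegB]
    | cons w ws =>
      rw [pvSegCur_eq]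
      conv_rhs => rw [pvSegB]
      cases hf : pvFindForm (w :: ws) with
      | none => simp
      | some k =>
        simp only [List.nil_append]
        subst hn
        rw [ih ((w :: ws).drop (k + 1)).length (by simp only [List.length_drop, List.length_cons]; omega) _ rfl]
theorem pvSegCur_nil_ne_nil (ts : List String) (h : ts ≠ []) : pvSegCur [] ts ≠ [] := by
  rw [pvSegCur_eq]
  cases hf : pvFindForm ts <;> simp [h]

-- ===== VERDICT (by name: the statement is the Claim_ definition above) =====
theorem split_coverage_references_py_spec : Claim_equal_split_coverage_references_py := by
  intro s _
  unfold Spec_split_coverage_references_py split_coverage_references_py split_coverage_references_py_alt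
  simp only
  have hA := pvFoldA_eq (PySem.Str.split₀ s) [] []
  simp only [List.nil_append] at hA
  rw [pvSegCur_nil_eq_segB] at hA
  by_cases hts : PySem.Str.split₀ s = []
  · rw [hts] at hA ⊢
    simp only [List.foldl_nil] at hA ⊢
    simp
  · have hne := pvSegCur_nil_ne_nil _ hts
    rw [pvSegCur_nil_eq_segB] at hne
    simp only [hts, if_neg, not_false_eq_true]
    generalize List.foldl pvStepA ([], []) (PySem.Str.split₀ s) = st at hA ⊢
    obtain ⟨forms, cur⟩ := st
    cases cur with
    | nil =>
      simp only [if_pos] at hA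
      simp only [ne_eq, not_true_eq_false, ite_false]
      rw [hA]
      simp [hne]
    | cons c cs =>
      simp only [reduceCtorEq, if_neg, not_false_eq_true] at hA
      cases forms with
      | nil => simp_all
      | cons f fs => simp_all
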